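-- pv_equiv track=rewrite | github.com/Denislb/advent-of-code-2023 | day_13/main.py | diff_by_one
-- ===== SOURCE A (Python) =====
-- def diff_by_one(map_list):
--     diffs = []
--     for idx, value in enumerate(map_list):
--         i = idx + 1
--         while i < len(map_list):
--             diff_size = 0
--             pos = 0
--             for x in range(len(value)):
--                 if map_list[i][x] != value[x]:
--                     diff_size += 1
--                     pos = x
--                     if diff_size > 1:
--                         break
--             if diff_size == 1:
--                 diffs.append((idx, i))
--             i += 1
--     return diffs
-- ===== SOURCE B (Python) =====
-- def diff_by_one(map_list):
--     m = max(map(len, map_list), default=0)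
--     pairs = []
--     for p in range(m):
--         buckets = {}
--         for i, row in enumerate(map_list):
--             key = (len(row), row[:p] + row[p + 1:])
--             buckets[key] = buckets.get(key, []) + [i]
--         for group in buckets.values():
--             for a, i in enumerate(group):
--                 for j in group[a + 1:]:
--                     if map_list[i] != map_list[j]:
--                         pairs.append((i, j))
--     return sorted(pairs)
-- ===== Notes on version B (the rewrite author's own statement) =====
-- stated objective: faster
-- what changed: Replaces A's all-pairs row comparison with bucketing rows under (length, single-position-masked key) per column, collecting distance-1 collisions and sorting the pairs.
-- intended difference: On lists where an earlier row is shorter than a later row at prefix-distance exactly 1, A returns that pair (it compares only the first row's length, silently ignoring the longer row's extra suffix) while B omits it; 'rows differing in exactly one position' is only meaningful for rows of equal length, so B's value is the intended one. — e.g. on diff_by_one(["ab", "axc"]): A returns [(0, 1)], B returns []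
import Mathlib
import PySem

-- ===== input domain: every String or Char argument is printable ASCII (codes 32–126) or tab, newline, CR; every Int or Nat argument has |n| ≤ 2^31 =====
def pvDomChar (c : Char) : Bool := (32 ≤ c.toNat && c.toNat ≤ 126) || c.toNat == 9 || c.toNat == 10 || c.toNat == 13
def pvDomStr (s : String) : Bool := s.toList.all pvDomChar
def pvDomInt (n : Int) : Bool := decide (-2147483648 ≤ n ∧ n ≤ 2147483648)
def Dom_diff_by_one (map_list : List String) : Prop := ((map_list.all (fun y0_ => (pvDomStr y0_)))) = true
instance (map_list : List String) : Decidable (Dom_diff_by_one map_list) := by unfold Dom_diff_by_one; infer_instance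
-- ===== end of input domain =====

-- B replaces A's all-pairs row scan by bucketing rows under (length, single-position-masked key) per column and
-- sorting the collision pairs. Pre_ excludes exactly the inputs where A raises IndexError; D_ states the one
-- intended difference (A's accidental prefix-compare of a shorter row against a longer later row).

-- ===== PORT A =====
-- inner 'for x in range(len(value))' loop of A, with its break at diff_size > 1; returns (diff_size, pos).
-- string indexing map_list[i][x] / value[x] is ported through PySem.List.pyGet? on the char lists (exact; both
-- indices are in range under Pre_, where Python returns without IndexError).
-- fuel = remaining iterations of the Python loop (structural recursion, same state and branches)
def aInner (v r : List Char) (fuel : Nat) (x : Nat) (ds : Int) (pos : Nat) : Int × Nat :=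
  match fuel with
  | 0 => (ds, pos)
  | fuel + 1 =>
    if x < v.length then
      if PySem.List.pyGet? r (x : Int) ≠ PySem.List.pyGet? v (x : Int) then
        if ds + 1 > 1 then (ds + 1, x)
        else aInner v r fuel (x + 1) (ds + 1) x
      else aInner v r fuel (x + 1) ds pos
    else (ds, pos)

-- the 'while i < len(map_list)' loop of A (fuel = remaining iterations)
def aWhile (ml : List (List Char)) (v : List Char) (idx : Int) (fuel : Nat) (i : Int)
    (acc : List (Int × Int)) : List (Int × Int) :=
  match fuel with
  | 0 => acc
  | fuel + 1 =>
    if i < (ml.length : Int) then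
      aWhile ml v idx fuel (i + 1)
        (if (aInner v (PySem.List.pyGetD ml i []) v.length 0 0 0).1 = 1 then acc ++ [(idx, i)]
         else acc)
    else acc

def diff_by_one (map_list : List String) : List (Int × Int) :=
  let ml := map_list.map String.toList
  (PySem.List.enumerate ml 0).foldl
    (fun acc pr => aWhile ml pr.2 pr.1 ml.length (pr.1 + 1) acc) []

-- ===== PORT B =====
-- key = row[:p] + row[p+1:]  (slices with a nonnegative Nat bound are exactly take/drop)
def maskAt (row : List Char) (p : Nat) : List Char := row.take p ++ row.drop (p + 1)

-- 'for a, i in enumerate(group): for j in group[a+1:]: …' of B (a = pr.1 ≥ 0, so .toNat is exact)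
def bGroupPairs (ml : List (List Char)) (g : List Int) (acc : List (Int × Int)) : List (Int × Int) :=
  (PySem.List.enumerate g 0).foldl (fun acc pr =>
    (g.drop (pr.1 + 1).toNat).foldl (fun acc j =>
      if PySem.List.pyGetD ml pr.2 [] ≠ PySem.List.pyGetD ml j [] then acc ++ [(pr.2, j)]
      else acc) acc) acc

-- one iteration of B's 'for p in range(m)': build the buckets dict keyed by (len(row), masked row),
-- then scan each group
def bBucketPairs (ml : List (List Char)) (p : Nat) (acc : List (Int × Int)) : List (Int × Int) :=
  let buckets := (PySem.List.enumerate ml 0).foldl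
    (fun d pr => d.modify (pr.2.length, maskAt pr.2 p) [] (· ++ [pr.1]))
    (PySem.Dict.empty : PySem.Dict (Nat × List Char) (List Int))
  buckets.values.foldl (fun acc g => bGroupPairs ml g acc) acc

def diff_by_one_alt (map_list : List String) : List (Int × Int) :=
  let ml := map_list.map String.toList
  let m := PySem.List.maxD (ml.map (fun r => r.length)) (fun x => x) 0
  PySem.List.sorted2
    ((List.range m).foldl (fun acc p => bBucketPairs ml p acc) [])
    Prod.fst Prod.snd false

-- ===== PRECONDITION & SPEC =====
-- number of mismatching positions over the common prefix of two rows
def prefDiffs (s t : String) : Nat :=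
  (s.toList.zip t.toList).countP (fun c => !(c.1 == c.2))

-- Pre_ excludes exactly the inputs on which A raises IndexError: a pair (earlier row s, later shorter row t)
-- whose scan reaches t's end, i.e. with fewer than 2 mismatches over the common prefix.
def Pre_diff_by_one (map_list : List String) : Prop :=
  List.Pairwise (fun s t => t.toList.length < s.toList.length → 2 ≤ prefDiffs s t) map_list
instance (map_list : List String) : Decidable (Pre_diff_by_one map_list) := by
  unfold Pre_diff_by_one; infer_instance

def pvWitness_diff_by_one : List String := ["#.#", "###", "#.#"]

-- On an earlier row shorter than a later row at prefix-distance exactly 1, A returns the pair (comparing only the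
-- first row's length, ignoring the longer row's suffix) while B returns nothing for it: 'differ in one position'
-- is only meaningful for rows of equal length, so B's value is the intended one.
def D_diff_by_one (map_list : List String) : Prop :=
  ¬ List.Pairwise (fun s t => ¬ (s.toList.length < t.toList.length ∧ prefDiffs s t = 1)) map_list
instance (map_list : List String) : Decidable (D_diff_by_one map_list) := by
  unfold D_diff_by_one; infer_instance

def Spec_diff_by_one (map_list : List String) (out : List (Int × Int)) : Prop :=
  ¬ D_diff_by_one map_list → out = diff_by_one_alt map_list
instance (map_list : List String) (out : List (Int × Int)) : Decidable (Spec_diff_by_one map_list out) := by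
  unfold Spec_diff_by_one; infer_instance

def pvDiffWitness_diff_by_one : List String := ["ab", "axc"]
def pvDiffWitnessOut_diff_by_one : (List (Int × Int)) × (List (Int × Int)) := ([(0, 1)], [])

-- ===== CLAIM (what is proved, stated in full; the proofs are below) =====
def Claim_unchanged_diff_by_one : Prop :=
  ∀ (map_list : List String), Dom_diff_by_one map_list → Pre_diff_by_one map_list →
    Spec_diff_by_one map_list (diff_by_one map_list)
def Claim_changed_diff_by_one : Prop :=
  Dom_diff_by_one (pvDiffWitness_diff_by_one) ∧ Pre_diff_by_one (pvDiffWitness_diff_by_one) ∧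
  D_diff_by_one (pvDiffWitness_diff_by_one) ∧
  diff_by_one (pvDiffWitness_diff_by_one) = pvDiffWitnessOut_diff_by_one.1 ∧
  diff_by_one_alt (pvDiffWitness_diff_by_one) = pvDiffWitnessOut_diff_by_one.2 ∧
  pvDiffWitnessOut_diff_by_one.1 ≠ pvDiffWitnessOut_diff_by_one.2
def Claim_exact_diff_by_one : Prop :=
  ∀ (map_list : List String), Dom_diff_by_one map_list → Pre_diff_by_one map_list →
    D_diff_by_one map_list → diff_by_one map_list ≠ diff_by_one_alt map_list

-- ===== LEMMAS AND PROOFS =====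

-- ---------- the strict lexicographic order used by sorted(pairs) ----------
def blt (a b : Int × Int) : Bool :=
  decide (a.1 < b.1) || (!decide (b.1 < a.1) && decide (a.2 < b.2))

theorem blt_asymm {a b : Int × Int} (h : blt a b = true) : blt b a = false := by
  simp [blt] at *; omega

theorem blt_total {a b : Int × Int} (h : a ≠ b) : blt a b = true ∨ blt b a = true := by
  rcases a with ⟨a1, a2⟩; rcases b with ⟨b1, b2⟩
  simp [blt]; simp [Prod.ext_iff] at h; omega

theorem blt_trans {a b c : Int × Int} (h1 : blt a b = true) (h2 : blt b c = true) :
    blt a c = true := by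
  simp [blt] at *; omega

theorem blt_irrefl (a : Int × Int) : blt a a = false := by simp [blt]

theorem blt_ne {a b : Int × Int} (h : blt a b = true) : a ≠ b := by
  intro rfl; simp [blt_irrefl] at h

theorem insertBy_perm {α : Type} (lt : α → α → Bool) (x : α) (ys : List α) :
    (PySem.List.insertBy lt x ys).Perm (x :: ys) := by
  induction ys with
  | nil => simp [PySem.List.insertBy]
  | cons y ys ih =>
    simp only [PySem.List.insertBy]
    split
    · exact List.Perm.refl _
    · exact ((ih.cons y).trans (List.Perm.swap x y ys))

theorem insertBy_pairwise {x : Int × Int} {ys : List (Int × Int)}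
    (hs : ys.Pairwise (fun a b => blt a b = true)) (hx : x ∉ ys) :
    (PySem.List.insertBy blt x ys).Pairwise (fun a b => blt a b = true) := by
  induction ys with
  | nil => simp [PySem.List.insertBy]
  | cons y ys ih =>
    rcases List.pairwise_cons.1 hs with ⟨hy, hys⟩
    simp only [PySem.List.insertBy]
    split
    · rename_i hlt
      refine List.pairwise_cons.2 ⟨?_, hs⟩
      intro z hz
      rcases List.mem_cons.1 hz with rfl | hz
      · exact hlt
      · exact blt_trans hlt (hy z hz)
    · rename_i hnlt
      have hxy : x ≠ y := by intro h; exact hx (h ▸ List.mem_cons_self)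
      have hyx : blt y x = true := by
        rcases blt_total hxy with h | h
        · exact absurd h hnlt
        · exact h
      refine List.pairwise_cons.2 ⟨?_, ih hys (fun h => hx (List.mem_cons_of_mem _ h))⟩
      intro z hz
      have := PySem.List.mem_insertBy (before := blt) (x := x) (ys := ys) (y := z)
      rcases this.1 hz with h | h
      · exact h ▸ hyx
      · exact hy z h

theorem pairwise_blt_eq_of_perm : ∀ {l₁ l₂ : List (Int × Int)},
    l₁.Pairwise (fun a b => blt a b = true) → l₂.Pairwise (fun a b => blt a b = true) →
    l₁.Perm l₂ → l₁ = l₂ := by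
  intro l₁
  induction l₁ with
  | nil => intro l₂ _ _ hp; simpa using hp.nil_eq.symm
  | cons a t₁ ih =>
    intro l₂ h₁ h₂ hp
    cases l₂ with
    | nil => exact absurd hp.symm.nil_eq (by simp)
    | cons b t₂ =>
      rcases List.pairwise_cons.1 h₁ with ⟨ha, ht₁⟩
      rcases List.pairwise_cons.1 h₂ with ⟨hb, ht₂⟩
      have hab : a = b := by
        by_contra hne
        have hamem : a ∈ b :: t₂ := hp.mem_iff.1 List.mem_cons_self
        have hbmem : b ∈ a :: t₁ := hp.mem_iff.2 List.mem_cons_self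
        have h1 : blt b a = true := by
          rcases List.mem_cons.1 hamem with h | h
          · exact absurd h hne
          · exact hb a h
        have h2 : blt a b = true := by
          rcases List.mem_cons.1 hbmem with h | h
          · exact absurd h.symm hne
          · exact ha b h
        simp [blt_asymm h2] at h1
      subst hab
      have := ih ht₁ ht₂ (hp.cons_inv)
      rw [this]

theorem nodup_of_pairwise_blt {l : List (Int × Int)}
    (h : l.Pairwise (fun a b => blt a b = true)) : l.Nodup :=
  h.imp (fun hab => blt_ne hab)

theorem foldl_insertBy_sorted : ∀ (xs acc : List (Int × Int)),
    (acc ++ xs).Nodup → acc.Pairwise (fun a b => blt a b = true) →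
    (xs.foldl (fun a x => PySem.List.insertBy blt x a) acc).Pairwise (fun a b => blt a b = true) ∧
    (xs.foldl (fun a x => PySem.List.insertBy blt x a) acc).Perm (acc ++ xs) := by
  intro xs
  induction xs with
  | nil => intro acc _ hs; exact ⟨hs, by simp⟩
  | cons x xs ih =>
    intro acc hnd hs
    have hxacc : x ∉ acc := by
      have h := List.nodup_append.1 hnd
      intro hx; exact h.2.2 x hx x (List.mem_cons_self (a := x) (l := xs)) rfl
    have hperm : (PySem.List.insertBy blt x acc ++ xs).Perm (acc ++ x :: xs) :=
      (((insertBy_perm blt x acc).append_right xs).trans List.perm_middle.symm)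
    have hnd' : (PySem.List.insertBy blt x acc ++ xs).Nodup := hperm.symm.nodup hnd
    have hs' := insertBy_pairwise hs hxacc
    have hmain := ih (PySem.List.insertBy blt x acc) hnd' hs'
    exact ⟨hmain.1, hmain.2.trans hperm⟩

theorem pyRange_one_nil {a b : Int} (h : b ≤ a) : PySem.List.pyRange a b 1 = [] := by
  apply List.eq_nil_iff_forall_not_mem.2
  intro x hx
  have := PySem.List.mem_pyRange_one.1 hx
  omega

theorem sorted2_eq_of_perm_pairwise {xs ys : List (Int × Int)}
    (hpw : ys.Pairwise (fun a b => blt a b = true)) (hperm : ys.Perm xs) :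
    PySem.List.sorted2 xs Prod.fst Prod.snd false = ys := by
  have hys : ys.Nodup := nodup_of_pairwise_blt hpw
  have hxs : xs.Nodup := hperm.nodup hys
  have h0 : PySem.List.sorted2 xs Prod.fst Prod.snd false =
      xs.foldl (fun a x => PySem.List.insertBy blt x a) [] := rfl
  have hmain := foldl_insertBy_sorted xs [] (by simpa using hxs) (by simp)
  rw [h0]
  exact pairwise_blt_eq_of_perm hmain.1 hpw (hmain.2.trans (by simpa using hperm.symm))

-- ---------- exact single-difference characterisation on char lists ----------
def dOne (v r : List Char) : Bool := ((v.zip r).countP (fun c => !(c.1 == c.2))) == 1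

def Eone (v r : List Char) (p : Nat) : Prop :=
  v[p]? ≠ r[p]? ∧ ∀ q : Nat, q ≠ p → v[q]? = r[q]?

theorem maskAt_eq_iff : ∀ (v r : List Char), v.length = r.length → ∀ p : Nat,
    (maskAt v p = maskAt r p ∧ v ≠ r) ↔ Eone v r p := by
  intro v
  induction v with
  | nil =>
    intro r h p
    cases r with
    | nil => simp [Eone, maskAt]
    | cons b r' => simp at h
  | cons a v' ih =>
    intro r h p
    cases r with
    | nil => simp at h
    | cons b r' =>
      have hlen : v'.length = r'.length := by simpa using h
      cases p with
      | zero =>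
        constructor
        · rintro ⟨hm, hne⟩
          have hv : v' = r' := by simpa [maskAt] using hm
          subst hv
          have hab : a ≠ b := by intro hab; exact hne (by rw [hab])
          refine ⟨by simpa using hab, ?_⟩
          intro q hq
          cases q with
          | zero => exact absurd rfl hq
          | succ q' => simp
        · rintro ⟨h1, h2⟩
          have hab : a ≠ b := by simpa using h1
          have hv : v' = r' := by
            apply List.ext_getElem?
            intro q
            simpa using h2 (q + 1) (by omega)
          subst hv
          exact ⟨by simp [maskAt], by simp [hab]⟩
      | succ p' =>
        constructor
        · rintro ⟨hm, hne⟩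
          obtain ⟨hab, hm'⟩ : a = b ∧ maskAt v' p' = maskAt r' p' := by
            simpa [maskAt] using hm
          subst hab
          have hne' : v' ≠ r' := fun he => hne (by rw [he])
          have hrec := (ih r' hlen p').1 ⟨hm', hne'⟩
          refine ⟨by simpa using hrec.1, ?_⟩
          intro q hq
          cases q with
          | zero => simp
          | succ q' => simpa using hrec.2 q' (by omega)
        · rintro ⟨h1, h2⟩
          have hab : a = b := by
            have := h2 0 (by omega)
            simpa using this
          subst hab
          have hE : Eone v' r' p' :=
            ⟨by simpa using h1, fun q hq => by simpa using h2 (q + 1) (by omega)⟩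
          have hrec := (ih r' hlen p').2 hE
          refine ⟨by simpa [maskAt] using hrec.1, ?_⟩
          intro he
          have : v' = r' := by injection he
          exact hrec.2 this

theorem countP_zip_zero_iff : ∀ (v r : List Char), v.length = r.length →
    (((v.zip r).countP (fun c => !(c.1 == c.2))) = 0 ↔ v = r) := by
  intro v
  induction v with
  | nil =>
    intro r h
    cases r with
    | nil => simp
    | cons b r' => simp at h
  | cons a v' ih =>
    intro r h
    cases r with
    | nil => simp at h
    | cons b r' =>
      have hlen : v'.length = r'.length := by simpa using h
      simp only [List.zip_cons_cons, List.countP_cons]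
      by_cases hab : a = b
      · subst hab
        simp [ih r' hlen]
      · simp [hab]

theorem dOne_iff : ∀ (v r : List Char), v.length = r.length →
    (dOne v r = true ↔ ∃ p, Eone v r p) := by
  intro v
  induction v with
  | nil =>
    intro r h
    cases r with
    | nil => simp [dOne, Eone]
    | cons b r' => simp at h
  | cons a v' ih =>
    intro r h
    cases r with
    | nil => simp at h
    | cons b r' =>
      have hlen : v'.length = r'.length := by simpa using h
      simp only [dOne, List.zip_cons_cons, List.countP_cons, beq_iff_eq] at *
      by_cases hab : a = b
      · subst hab
        constructor
        · intro hc
          have : ((v'.zip r').countP (fun c => !(c.1 == c.2))) = 1 := by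
            simp at hc ⊢
            omega
          obtain ⟨p', hp'⟩ := (ih r' hlen).1 (by simpa [dOne] using this)
          refine ⟨p' + 1, by simpa using hp'.1, ?_⟩
          intro q hq
          cases q with
          | zero => simp
          | succ q' => simpa using hp'.2 q' (by omega)
        · rintro ⟨p, hp⟩
          cases p with
          | zero => exact (hp.1 (by simp)).elim
          | succ p' =>
            have hE : Eone v' r' p' :=
              ⟨by simpa using hp.1, fun q hq => by simpa using hp.2 (q + 1) (by omega)⟩
            have hcc := (ih r' hlen).2 ⟨p', hE⟩
            have hc1 : (v'.zip r').countP (fun c => !(c.1 == c.2)) = 1 := by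
              simpa [dOne] using hcc
            simp [hc1]
      · constructor
        · intro hc
          have : ((v'.zip r').countP (fun c => !(c.1 == c.2))) = 0 := by
            simp [hab] at hc
            rw [List.countP_eq_zero]
            rintro ⟨x, y⟩ hm
            simp [hc x y hm]
          have hv : v' = r' := (countP_zip_zero_iff v' r' hlen).1 this
          subst hv
          refine ⟨0, by simpa using hab, ?_⟩
          intro q hq
          cases q with
          | zero => exact absurd rfl hq
          | succ q' => simp
        · rintro ⟨p, hp⟩
          cases p with
          | zero =>
            have hv : v' = r' := by
              apply List.ext_getElem?
              intro q
              simpa using hp.2 (q + 1) (by omega)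
            subst hv
            have : ((v'.zip v').countP (fun c => !(c.1 == c.2))) = 0 :=
              (countP_zip_zero_iff v' v' rfl).2 rfl
            simp [hab, this]
          | succ p' =>
            have : a = b := by
              have := hp.2 0 (by omega)
              simpa using this
            exact absurd this hab

theorem Eone_unique {v r : List Char} {p q : Nat} (hp : Eone v r p) (hq : Eone v r q) : p = q := by
  by_contra hne
  exact hp.1 (hq.2 p hne)

theorem Eone_lt_length {v r : List Char} {p : Nat} (hlen : v.length = r.length)
    (h : Eone v r p) : p < v.length := by
  by_contra hge
  exact h.1 (by rw [List.getElem?_eq_none (by omega), List.getElem?_eq_none (by omega)])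

-- ---------- closed form for A ----------
theorem getD_cast (ml : List (List Char)) (a : Nat) (ha : a < ml.length) :
    PySem.List.pyGetD ml ((a : Nat) : Int) [] = ml[a] := by
  rw [PySem.List.pyGetD_natCast]
  exact List.getD_eq_getElem ml [] ha

def canon (ml : List (List Char)) : List (Int × Int) :=
  (PySem.List.enumerate ml 0).flatMap (fun pr =>
    ((PySem.List.pyRange (pr.1 + 1) (ml.length : Int) 1).filter
      (fun j => dOne pr.2 (PySem.List.pyGetD ml j []))).map (fun j => (pr.1, j)))

theorem aInner_eq (v r : List Char) : ∀ (fuel x : Nat) (ds : Int) (pos : Nat),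
    v.length - x ≤ fuel → 0 ≤ ds → ds ≤ 1 →
    (r.length < v.length →
      2 ≤ ds + (((v.drop x).zip (r.drop x)).countP (fun c => !(c.1 == c.2)) : Int)) →
    (aInner v r fuel x ds pos).1 =
      min (ds + (((v.drop x).zip (r.drop x)).countP (fun c => !(c.1 == c.2)) : Int)) 2 := by
  intro fuel
  induction fuel with
  | zero =>
    intro x ds pos hf h0 h1 _h2
    rw [List.drop_eq_nil_of_le (by omega)]
    simp [aInner]
    omega
  | succ fuel ih =>
    intro x ds pos hf h0 h1 h2
    by_cases hx : x < v.length
    · by_cases hxr : x < r.length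
      · rw [aInner, if_pos hx]
        have hcond : (PySem.List.pyGet? r (x : Int) = PySem.List.pyGet? v (x : Int)) ↔ v[x] = r[x] := by
          rw [PySem.List.pyGet?_natCast, PySem.List.pyGet?_natCast,
            List.getElem?_eq_getElem hx, List.getElem?_eq_getElem hxr]
          simp [eq_comm]
        have hcnt : ((((v.drop x).zip (r.drop x)).countP (fun c => !(c.1 == c.2))) : Int)
            = (if v[x] = r[x] then 0 else 1)
              + ((((v.drop (x+1)).zip (r.drop (x+1))).countP (fun c => !(c.1 == c.2))) : Int) := by
          rw [List.drop_eq_getElem_cons hx, List.drop_eq_getElem_cons hxr,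
            List.zip_cons_cons, List.countP_cons]
          by_cases hvr : v[x] = r[x] <;> simp [hvr]
          omega
        by_cases hvr : v[x] = r[x]
        · rw [if_neg (not_ne_iff.2 (hcond.2 hvr))]
          rw [ih (x+1) ds pos (by omega) h0 h1 (fun hlt => by
            have := h2 hlt; rw [hcnt] at this; simpa [hvr] using this), hcnt]
          simp [hvr]
        · rw [if_pos (fun he => hvr (hcond.1 he))]
          by_cases hds : ds + 1 > 1
          · rw [if_pos hds]
            rw [hcnt]
            simp only [if_neg hvr]
            have hcz : (0:Int) ≤ ((((v.drop (x+1)).zip (r.drop (x+1))).countP (fun c => !(c.1 == c.2))) : Int) := by positivity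
            omega
          · rw [if_neg hds]
            rw [ih (x+1) (ds+1) x (by omega) (by omega) (by omega) (fun hlt => by
              have := h2 hlt; rw [hcnt] at this; simp only [if_neg hvr] at this; omega), hcnt]
            simp only [if_neg hvr]
            omega
      · -- x ≥ r.length but x < v.length: Python would already have raised unless 2 mismatches
        -- came first; Pre_ makes this branch unreachable.
        exfalso
        have hrl : r.length < v.length := by omega
        have h2' := h2 hrl
        have hdr : r.drop x = [] := List.drop_eq_nil_of_le (by omega)
        rw [hdr, List.zip_nil_right] at h2'
        simp at h2'
        omega
    · rw [aInner, if_neg hx, List.drop_eq_nil_of_le (by omega)]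
      simp
      omega

theorem aWhile_eq (ml : List (List Char)) (v : List Char) (idx : Int) : ∀ (fuel : Nat) (i : Int)
    (acc : List (Int × Int)), (((ml.length : Int)) - i).toNat ≤ fuel →
    aWhile ml v idx fuel i acc = acc ++
      ((PySem.List.pyRange i (ml.length : Int) 1).filter
        (fun j => (aInner v (PySem.List.pyGetD ml j []) v.length 0 0 0).1 = 1)).map
        (fun j => (idx, j)) := by
  intro fuel
  induction fuel with
  | zero =>
    intro i acc hf
    rw [pyRange_one_nil (by omega)]
    simp [aWhile]
  | succ fuel ih =>
    intro i acc hf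
    by_cases hi : i < (ml.length : Int)
    · rw [aWhile, if_pos hi, ih (i+1) _ (by omega), PySem.List.pyRange_one_cons hi]
      by_cases hc : (aInner v (PySem.List.pyGetD ml i []) v.length 0 0 0).1 = 1
      · simp [hc]
      · simp [hc]
    · rw [aWhile, if_neg hi, pyRange_one_nil (by omega)]
      simp

theorem diff_by_one_eq_canon (map_list : List String)
    (h : Pre_diff_by_one map_list) :
    diff_by_one map_list = canon (map_list.map String.toList) := by
  have Hpre : ∀ (a b : Nat) (ha : a < (map_list.map String.toList).length)
      (hb : b < (map_list.map String.toList).length), a < b →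
      ((map_list.map String.toList)[b]).length < ((map_list.map String.toList)[a]).length →
      2 ≤ (((map_list.map String.toList)[a].zip ((map_list.map String.toList)[b])).countP
            (fun c => !(c.1 == c.2))) := by
    intro a b ha hb hab hlt
    have hh := (List.pairwise_iff_getElem.1 h) a b (by simpa using ha) (by simpa using hb) hab
    simp only [List.getElem_map] at *
    exact hh hlt
  set ml := map_list.map String.toList with hml
  show (PySem.List.enumerate ml 0).foldl
      (fun acc pr => aWhile ml pr.2 pr.1 ml.length (pr.1 + 1) acc) [] = canon ml
  have hfun : ∀ (acc : List (Int × Int)) (pr : Int × List Char), pr ∈ PySem.List.enumerate ml 0 →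
      aWhile ml pr.2 pr.1 ml.length (pr.1 + 1) acc = acc ++
        ((PySem.List.pyRange (pr.1 + 1) (ml.length : Int) 1).filter
          (fun j => dOne pr.2 (PySem.List.pyGetD ml j []))).map (fun j => (pr.1, j)) := by
    intro acc pr hpr
    rcases PySem.List.mem_enumerate_iff ml 0 pr |>.1 hpr with ⟨k0, hk0, rfl⟩
    rw [aWhile_eq ml _ _ ml.length _ acc (by omega)]
    congr 1
    congr 1
    apply List.filter_congr
    intro j hj
    have hjr := PySem.List.mem_pyRange_one.1 hj
    have hk : k0 < ml.length := hk0
    have hprpos : (0:Int) ≤ (k0:Int) := by positivity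
    have hjpos : (0:Int) ≤ j := by omega
    have hjlt : j.toNat < ml.length := by omega
    have hgj : PySem.List.pyGetD ml j [] = ml[j.toNat]'hjlt := by
      have hj' : j = ((j.toNat : Nat) : Int) := by omega
      conv_lhs => rw [hj']
      exact getD_cast ml j.toNat hjlt
    have hkj : k0 < j.toNat := by simp at hjr; omega
    rw [aInner_eq _ _ (0 + (k0:Int), ml[k0]).2.length 0 0 0 (by omega) le_rfl (by omega) (by
      intro hlt
      rw [hgj] at hlt ⊢
      simp only [List.drop_zero, zero_add]
      have := Hpre k0 j.toNat hk hjlt hkj (by simpa using hlt)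
      exact_mod_cast this)]
    simp only [List.drop_zero, dOne, zero_add]
    have hcz : (0:Int) ≤ (((ml[k0].zip (PySem.List.pyGetD ml j [])).countP (fun c => !(c.1 == c.2))) : Int) := by positivity
    by_cases h1 : ((ml[k0].zip (PySem.List.pyGetD ml j [])).countP (fun c => !(c.1 == c.2))) = 1
    · simp [h1]
    · have : ¬ min ((((ml[k0].zip (PySem.List.pyGetD ml j [])).countP (fun c => !(c.1 == c.2))) : Int)) 2 = 1 := by
        omega
      simp [this, h1]
  have hstep := PySem.List.foldl_congr_mem (PySem.List.enumerate ml 0)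
    (fun acc pr => aWhile ml pr.2 pr.1 ml.length (pr.1 + 1) acc)
    (fun acc pr => acc ++
      ((PySem.List.pyRange (pr.1 + 1) (ml.length : Int) 1).filter
        (fun j => dOne pr.2 (PySem.List.pyGetD ml j []))).map (fun j => (pr.1, j)))
    [] hfun
  exact hstep.trans (by rw [PySem.List.foldl_append_eq_flatMap]; simp [canon])

-- ---------- closed form for B ----------
def grp (ml : List (List Char)) (p : Nat) (k : Nat × List Char) : List Int :=
  ((PySem.List.enumerate ml 0).filter
    (fun pr => (pr.2.length, maskAt pr.2 p) == k)).map (fun pr => pr.1)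

def gPairs (ml : List (List Char)) (g : List Int) : List (Int × Int) :=
  (PySem.List.enumerate g 0).flatMap (fun pr =>
    ((g.drop (pr.1 + 1).toNat).filter
      (fun j => decide (PySem.List.pyGetD ml pr.2 [] ≠ PySem.List.pyGetD ml j []))).map
      (fun j => (pr.2, j)))

def blockP (ml : List (List Char)) (p : Nat) : List (Int × Int) :=
  (PySem.Set.ofList ((PySem.List.enumerate ml 0).map
    (fun pr => (pr.2.length, maskAt pr.2 p)))).flatMap
    (fun k => gPairs ml (grp ml p k))

def bPairs (ml : List (List Char)) (m : Nat) : List (Int × Int) :=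
  (List.range m).flatMap (fun p => blockP ml p)

theorem flatMap_map_local {α β γ : Type} (l : List α) (f : α → β) (g : β → List γ) :
    (l.map f).flatMap g = l.flatMap (fun x => g (f x)) := by
  simp [List.flatMap_def, List.map_map]
  rfl

theorem bGroupPairs_eq (ml : List (List Char)) (g : List Int) (acc : List (Int × Int)) :
    bGroupPairs ml g acc = acc ++ gPairs ml g := by
  show (PySem.List.enumerate g 0).foldl _ acc = _
  have hfun : ∀ (acc : List (Int × Int)) (pr : Int × Int), pr ∈ PySem.List.enumerate g 0 →
      ((g.drop (pr.1 + 1).toNat).foldl (fun acc j =>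
        if PySem.List.pyGetD ml pr.2 [] ≠ PySem.List.pyGetD ml j [] then acc ++ [(pr.2, j)]
        else acc) acc) = acc ++
        ((g.drop (pr.1 + 1).toNat).filter
          (fun j => decide (PySem.List.pyGetD ml pr.2 [] ≠ PySem.List.pyGetD ml j []))).map
          (fun j => (pr.2, j)) := by
    intro acc pr _
    exact PySem.List.foldl_append_ite _ _ _ _
  have hstep := PySem.List.foldl_congr_mem (PySem.List.enumerate g 0)
    (fun acc pr => (g.drop (pr.1 + 1).toNat).foldl (fun acc j =>
        if PySem.List.pyGetD ml pr.2 [] ≠ PySem.List.pyGetD ml j [] then acc ++ [(pr.2, j)]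
        else acc) acc)
    (fun acc pr => acc ++
      ((g.drop (pr.1 + 1).toNat).filter
        (fun j => decide (PySem.List.pyGetD ml pr.2 [] ≠ PySem.List.pyGetD ml j []))).map
        (fun j => (pr.2, j)))
    acc hfun
  exact hstep.trans (by rw [PySem.List.foldl_append_eq_flatMap]; rfl)

theorem buckets_values (ml : List (List Char)) (p : Nat) :
    ((PySem.List.enumerate ml 0).foldl
      (fun d pr => d.modify (pr.2.length, maskAt pr.2 p) [] (· ++ [pr.1]))
      (PySem.Dict.empty : PySem.Dict (Nat × List Char) (List Int))).values =
    (PySem.Set.ofList ((PySem.List.enumerate ml 0).map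
      (fun pr => (pr.2.length, maskAt pr.2 p)))).map
      (fun k => grp ml p k) := by
  set d := (PySem.List.enumerate ml 0).foldl
      (fun d pr => d.modify (pr.2.length, maskAt pr.2 p) [] (· ++ [pr.1]))
      (PySem.Dict.empty : PySem.Dict (Nat × List Char) (List Int)) with hd
  have hkeys : d.keys = PySem.Set.ofList ((PySem.List.enumerate ml 0).map
      (fun pr => (pr.2.length, maskAt pr.2 p))) := by
    rw [hd, PySem.Dict.keys_foldl_modify_key (PySem.List.enumerate ml 0)
      (fun pr => (pr.2.length, maskAt pr.2 p)) [] (fun d pr => (· ++ [pr.1])) PySem.Dict.empty]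
    rw [PySem.Dict.keys_empty, PySem.Set.update_nil_left]
  have hnd : d.keys.Nodup := by rw [hkeys]; exact PySem.Set.nodup_ofList _
  have hget : ∀ k, d.getD k [] = grp ml p k := by
    intro k
    have hmap : d = ((PySem.List.enumerate ml 0).map
        (fun pr => ((pr.2.length, maskAt pr.2 p), pr.1))).foldl
        (fun d q => d.modify q.1 [] (· ++ [q.2])) PySem.Dict.empty := by
      rw [hd, List.foldl_map]
    rw [hmap, PySem.Dict.getD_foldl_modify_append]
    rw [PySem.Dict.getD_empty, List.filter_map]
    simp [grp, Function.comp_def, List.map_map]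
  rw [PySem.Dict.values_eq_map_keys d hnd [], hkeys]
  exact List.map_congr_left (fun k _ => hget k)

theorem bBucketPairs_eq (ml : List (List Char)) (p : Nat) (acc : List (Int × Int)) :
    bBucketPairs ml p acc = acc ++
      (PySem.Set.ofList ((PySem.List.enumerate ml 0).map
        (fun pr => (pr.2.length, maskAt pr.2 p)))).flatMap
        (fun k => gPairs ml (grp ml p k)) := by
  show ((PySem.List.enumerate ml 0).foldl
      (fun d pr => d.modify (pr.2.length, maskAt pr.2 p) [] (· ++ [pr.1]))
      (PySem.Dict.empty : PySem.Dict (Nat × List Char) (List Int))).values.foldl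
      (fun acc g => bGroupPairs ml g acc) acc = _
  rw [buckets_values ml p]
  have hfun : ∀ (acc : List (Int × Int)) (g : List Int),
      g ∈ (PySem.Set.ofList ((PySem.List.enumerate ml 0).map
        (fun pr => (pr.2.length, maskAt pr.2 p)))).map
        (fun k => grp ml p k) →
      bGroupPairs ml g acc = acc ++ gPairs ml g := fun acc g _ => bGroupPairs_eq ml g acc
  have hstep := PySem.List.foldl_congr_mem _
    (fun acc g => bGroupPairs ml g acc) (fun acc g => acc ++ gPairs ml g) acc hfun
  refine hstep.trans ?_
  rw [PySem.List.foldl_append_eq_flatMap]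
  rw [flatMap_map_local]

theorem diff_by_one_alt_eq (map_list : List String) :
    diff_by_one_alt map_list =
      PySem.List.sorted2
        (bPairs (map_list.map String.toList)
          (PySem.List.maxD ((map_list.map String.toList).map (fun r => r.length)) (fun x => x) 0))
        Prod.fst Prod.snd false := by
  set ml := map_list.map String.toList with hml
  set m := PySem.List.maxD (ml.map (fun r => r.length)) (fun x => x) 0 with hm
  show PySem.List.sorted2
      ((List.range m).foldl (fun acc p => bBucketPairs ml p acc) []) Prod.fst Prod.snd false = _
  congr 1
  have hfun : ∀ (acc : List (Int × Int)) (p : Nat), p ∈ List.range m →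
      bBucketPairs ml p acc = acc ++
        (PySem.Set.ofList ((PySem.List.enumerate ml 0).map
          (fun pr => (pr.2.length, maskAt pr.2 p)))).flatMap
          (fun k => gPairs ml (grp ml p k)) := fun acc p _ => bBucketPairs_eq ml p acc
  have hstep := PySem.List.foldl_congr_mem (List.range m)
    (fun acc p => bBucketPairs ml p acc)
    (fun acc p => acc ++
      (PySem.Set.ofList ((PySem.List.enumerate ml 0).map
        (fun pr => (pr.2.length, maskAt pr.2 p)))).flatMap
        (fun k => gPairs ml (grp ml p k)))
    [] hfun
  exact hstep.trans (by rw [PySem.List.foldl_append_eq_flatMap]; simp [bPairs, blockP])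


-- ---------- structure of the groups ----------
theorem enumerate_cons {α : Type} (x : α) (t : List α) (s : Int) :
    PySem.List.enumerate (x :: t) s = (s, x) :: PySem.List.enumerate t (s + 1) := rfl

theorem enumerate_pairwise_snd {α : Type} (R : α → α → Prop) :
    ∀ (g : List α) (s : Int), g.Pairwise R →
    (PySem.List.enumerate g s).Pairwise (fun pr qr => R pr.2 qr.2) := by
  intro g
  induction g with
  | nil => intro s _; simp [PySem.List.enumerate]
  | cons x t ih =>
    intro s hg
    rcases List.pairwise_cons.1 hg with ⟨hx, ht⟩
    rw [enumerate_cons]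
    refine List.pairwise_cons.2 ⟨?_, ih (s + 1) ht⟩
    intro q hq
    rcases (PySem.List.mem_enumerate_iff t (s + 1) q).1 hq with ⟨k, hk, rfl⟩
    exact hx _ (List.getElem_mem hk)

theorem mem_grp (ml : List (List Char)) (p : Nat) (k : Nat × List Char) (i : Int) :
    i ∈ grp ml p k ↔ ∃ (a : Nat) (ha : a < ml.length),
      i = (a : Int) ∧ (ml[a].length, maskAt ml[a] p) = k := by
  unfold grp
  rw [List.mem_map]
  constructor
  · rintro ⟨pr, hpr, rfl⟩
    rcases List.mem_filter.1 hpr with ⟨hmem, hcond⟩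
    rcases (PySem.List.mem_enumerate_iff ml 0 pr).1 hmem with ⟨a, ha, rfl⟩
    exact ⟨a, ha, by simp, by simpa using hcond⟩
  · rintro ⟨a, ha, rfl, hmask⟩
    refine ⟨((a : Int), ml[a]), List.mem_filter.2 ⟨?_, by simpa using hmask⟩, rfl⟩
    exact (PySem.List.mem_enumerate_iff ml 0 _).2 ⟨a, ha, by simp⟩

theorem grp_pairwise (ml : List (List Char)) (p : Nat) (k : Nat × List Char) :
    (grp ml p k).Pairwise (· < ·) := by
  unfold grp
  rw [List.pairwise_map]
  exact (PySem.List.pairwise_lt_enumerate ml 0).filter _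

theorem mem_gPairs {ml : List (List Char)} {g : List Int} (hg : g.Pairwise (· < ·))
    (x : Int × Int) :
    x ∈ gPairs ml g ↔ ∃ i j : Int, i ∈ g ∧ j ∈ g ∧ i < j ∧ x = (i, j) ∧
      PySem.List.pyGetD ml i [] ≠ PySem.List.pyGetD ml j [] := by
  unfold gPairs
  rw [List.mem_flatMap]
  constructor
  · rintro ⟨pr, hpr, hx⟩
    rcases (PySem.List.mem_enumerate_iff g 0 pr).1 hpr with ⟨a, ha, rfl⟩
    rcases List.mem_map.1 hx with ⟨j, hj, rfl⟩
    rcases List.mem_filter.1 hj with ⟨hjd, hjc⟩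
    have htn : ((0 + (a : Int)) + 1).toNat = a + 1 := by omega
    rw [htn] at hjd
    rcases List.mem_iff_getElem.1 hjd with ⟨t, ht, hjt⟩
    have htlen : a + 1 + t < g.length := by rw [List.length_drop] at ht; omega
    rw [List.getElem_drop] at hjt
    have hlt : g[a] < g[a + 1 + t] :=
      (List.pairwise_iff_getElem.1 hg) a (a + 1 + t) ha htlen (by omega)
    refine ⟨g[a], j, List.getElem_mem ha, ?_, ?_, by simp, by simpa using hjc⟩
    · rw [← hjt]; exact List.getElem_mem htlen
    · rw [← hjt]; exact hlt
  · rintro ⟨i, j, hi, hj, hij, rfl, hne⟩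
    rcases List.mem_iff_getElem.1 hi with ⟨a, ha, rfl⟩
    rcases List.mem_iff_getElem.1 hj with ⟨b, hb, rfl⟩
    have hab : a < b := by
      rcases Nat.lt_trichotomy a b with h | h | h
      · exact h
      · subst h; exact absurd hij (lt_irrefl _)
      · exact absurd ((List.pairwise_iff_getElem.1 hg) b a hb ha h) (by omega)
    refine ⟨((a : Int), g[a]), (PySem.List.mem_enumerate_iff g 0 _).2 ⟨a, ha, by simp⟩, ?_⟩
    rw [List.mem_map]
    refine ⟨g[b], List.mem_filter.2 ⟨?_, by simpa using hne⟩, by simp⟩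
    have htn : (((a : Int)) + 1).toNat = a + 1 := by omega
    rw [htn]
    rw [List.mem_iff_getElem]
    refine ⟨b - (a + 1), by rw [List.length_drop]; omega, ?_⟩
    rw [List.getElem_drop]
    congr 1
    omega

theorem mem_gPairs_fst {ml : List (List Char)} {g : List Int} (hg : g.Pairwise (· < ·))
    {x : Int × Int} (hx : x ∈ gPairs ml g) : x.1 ∈ g := by
  rcases (mem_gPairs hg x).1 hx with ⟨i, j, hi, _, _, rfl, _⟩
  exact hi

theorem nodup_gPairs {ml : List (List Char)} {g : List Int} (hg : g.Pairwise (· < ·)) :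
    (gPairs ml g).Nodup := by
  have hgnd : g.Nodup := hg.imp (fun h => ne_of_lt h)
  unfold gPairs
  rw [List.flatMap_def, List.nodup_flatten]
  constructor
  · intro l hl
    rcases List.mem_map.1 hl with ⟨pr, _, rfl⟩
    refine List.Nodup.map (fun a b h => ?_) (((hgnd.sublist (List.drop_sublist _ _)).filter _))
    exact congrArg Prod.snd h
  · rw [List.pairwise_map]
    refine (enumerate_pairwise_snd (· < ·) g 0 hg).imp ?_
    intro pr qr hlt x hx hx2
    rcases List.mem_map.1 hx with ⟨j, _, rfl⟩
    rcases List.mem_map.1 hx2 with ⟨j', _, hj'⟩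
    have h2 : qr.2 = pr.2 := by simpa using congrArg Prod.fst hj'
    omega

theorem mem_gPairs_key {ml : List (List Char)} {p : Nat} {k : Nat × List Char} {x : Int × Int}
    (hx : x ∈ gPairs ml (grp ml p k)) :
    ∃ (a : Nat) (ha : a < ml.length), x.1 = (a : Int) ∧ (ml[a].length, maskAt ml[a] p) = k := by
  have := mem_gPairs_fst (grp_pairwise ml p k) hx
  exact (mem_grp ml p k x.1).1 this

theorem mem_blockP (ml : List (List Char)) (p : Nat) (x : Int × Int) :
    x ∈ blockP ml p ↔ ∃ (a b : Nat) (ha : a < ml.length) (hb : b < ml.length),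
      a < b ∧ x = ((a : Int), (b : Int)) ∧ ml[a].length = ml[b].length ∧
      maskAt ml[a] p = maskAt ml[b] p ∧ ml[a] ≠ ml[b] := by
  unfold blockP
  rw [List.mem_flatMap]
  constructor
  · rintro ⟨k, hk, hx⟩
    rcases (mem_gPairs (grp_pairwise ml p k) x).1 hx with ⟨i, j, hi, hj, hij, rfl, hne⟩
    rcases (mem_grp ml p k i).1 hi with ⟨a, ha, rfl, hma⟩
    rcases (mem_grp ml p k j).1 hj with ⟨b, hb, rfl, hmb⟩
    have hab : a < b := by exact_mod_cast hij
    rw [getD_cast ml a ha, getD_cast ml b hb] at hne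
    have hk2 : (ml[a].length, maskAt ml[a] p) = (ml[b].length, maskAt ml[b] p) := by
      rw [hma, hmb]
    exact ⟨a, b, ha, hb, hab, rfl, by simpa using congrArg Prod.fst hk2,
      by simpa using congrArg Prod.snd hk2, hne⟩
  · rintro ⟨a, b, ha, hb, hab, rfl, hlen, hmask, hne⟩
    refine ⟨(ml[a].length, maskAt ml[a] p), ?_, ?_⟩
    · rw [PySem.Set.mem_ofList]
      rw [List.mem_map]
      exact ⟨((a : Int), ml[a]), (PySem.List.mem_enumerate_iff ml 0 _).2 ⟨a, ha, by simp⟩, rfl⟩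
    · rw [mem_gPairs (grp_pairwise ml p _)]
      refine ⟨(a : Int), (b : Int), ?_, ?_, by exact_mod_cast hab, rfl, ?_⟩
      · exact (mem_grp ml p _ _).2 ⟨a, ha, rfl, rfl⟩
      · exact (mem_grp ml p _ _).2 ⟨b, hb, rfl, by rw [hlen, hmask]⟩
      · rw [getD_cast ml a ha, getD_cast ml b hb]; exact hne

theorem nodup_blockP (ml : List (List Char)) (p : Nat) : (blockP ml p).Nodup := by
  unfold blockP
  rw [List.flatMap_def, List.nodup_flatten]
  constructor
  · intro l hl
    rcases List.mem_map.1 hl with ⟨k, _, rfl⟩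
    exact nodup_gPairs (grp_pairwise ml p k)
  · rw [List.pairwise_map]
    refine (PySem.Set.nodup_ofList _).imp ?_
    intro k1 k2 hne x hx hx2
    rcases mem_gPairs_key hx with ⟨a1, ha1, he1, hm1⟩
    rcases mem_gPairs_key hx2 with ⟨a2, ha2, he2, hm2⟩
    have : a1 = a2 := by rw [he1] at he2; exact_mod_cast he2
    subst this
    exact hne (hm1 ▸ hm2 ▸ rfl)

theorem mem_bPairs (ml : List (List Char)) (m : Nat) (x : Int × Int) :
    x ∈ bPairs ml m ↔ ∃ p < m, x ∈ blockP ml p := by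
  unfold bPairs
  rw [List.mem_flatMap]
  constructor
  · rintro ⟨p, hp, hx⟩; exact ⟨p, List.mem_range.1 hp, hx⟩
  · rintro ⟨p, hp, hx⟩; exact ⟨p, List.mem_range.2 hp, hx⟩

theorem nodup_bPairs (ml : List (List Char)) (m : Nat) : (bPairs ml m).Nodup := by
  unfold bPairs
  rw [List.flatMap_def, List.nodup_flatten]
  constructor
  · intro l hl
    rcases List.mem_map.1 hl with ⟨p, _, rfl⟩
    exact nodup_blockP ml p
  · rw [List.pairwise_map]
    refine (List.nodup_range).imp ?_
    intro p1 p2 hne x hx hx2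
    rcases (mem_blockP ml p1 x).1 hx with ⟨a, b, ha, hb, hab, rfl, hlen1, hm1, hne1⟩
    rcases (mem_blockP ml p2 _).1 hx2 with ⟨a', b', ha', hb', hab', hx', hlen2, hm2, hne2⟩
    have haa : a = a' := by
      have h := congrArg Prod.fst hx'; simp at h; exact_mod_cast h
    have hbb : b = b' := by
      have h := congrArg Prod.snd hx'; simp at h; exact_mod_cast h
    subst haa; subst hbb
    have h1 : Eone ml[a] ml[b] p1 := (maskAt_eq_iff ml[a] ml[b] hlen1 p1).1 ⟨hm1, hne1⟩
    have h2 : Eone ml[a] ml[b] p2 := (maskAt_eq_iff ml[a] ml[b] hlen1 p2).1 ⟨hm2, hne2⟩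
    exact hne (Eone_unique h1 h2)

-- ---------- canon: membership and order ----------
theorem mem_canon (ml : List (List Char)) (x : Int × Int) :
    x ∈ canon ml ↔ ∃ (a b : Nat) (ha : a < ml.length) (hb : b < ml.length),
      a < b ∧ x = ((a : Int), (b : Int)) ∧ dOne ml[a] ml[b] = true := by
  unfold canon
  rw [List.mem_flatMap]
  constructor
  · rintro ⟨pr, hpr, hx⟩
    rcases (PySem.List.mem_enumerate_iff ml 0 pr).1 hpr with ⟨a, ha, rfl⟩
    rcases List.mem_map.1 hx with ⟨j, hj, rfl⟩
    rcases List.mem_filter.1 hj with ⟨hjr, hjc⟩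
    have hjr' := PySem.List.mem_pyRange_one.1 hjr
    simp only at hjr'
    have hj0 : 0 ≤ j := by omega
    have hj' : j = ((j.toNat : Nat) : Int) := by omega
    refine ⟨a, j.toNat, ha, by omega, by omega, by simp [Prod.ext_iff]; omega, ?_⟩
    have hg : PySem.List.pyGetD ml j [] = ml[j.toNat]'(by omega) := by
      conv_lhs => rw [hj']
      exact getD_cast ml j.toNat (by omega)
    rw [← hg]
    simpa using hjc
  · rintro ⟨a, b, ha, hb, hab, rfl, hd⟩
    refine ⟨((a : Int), ml[a]), (PySem.List.mem_enumerate_iff ml 0 _).2 ⟨a, ha, by simp⟩, ?_⟩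
    rw [List.mem_map]
    refine ⟨(b : Int), List.mem_filter.2 ⟨?_, ?_⟩, by simp⟩
    · rw [PySem.List.mem_pyRange_one]
      constructor
      · simp; omega
      · simp; omega
    · rw [getD_cast ml b hb]
      simpa using hd

theorem canon_pairwise (ml : List (List Char)) :
    (canon ml).Pairwise (fun a b => blt a b = true) := by
  unfold canon
  rw [List.flatMap_def, List.pairwise_flatten]
  constructor
  · intro l hl
    rcases List.mem_map.1 hl with ⟨pr, _, rfl⟩
    rw [List.pairwise_map]
    refine ((PySem.List.pairwise_lt_pyRange_one _ _).filter _).imp ?_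
    intro j1 j2 h
    simp [blt]
    omega
  · rw [List.pairwise_map]
    refine (PySem.List.pairwise_lt_enumerate ml 0).imp ?_
    intro pr qr hlt x hx y hy
    rcases List.mem_map.1 hx with ⟨j, _, rfl⟩
    rcases List.mem_map.1 hy with ⟨j', _, rfl⟩
    simp [blt]
    omega

-- m bounds every row length
theorem row_len_le_m (ml : List (List Char)) (a : Nat) (ha : a < ml.length) :
    ml[a].length ≤ PySem.List.maxD (ml.map (fun r => r.length)) (fun x => x) 0 := by
  have hne : ml.map (fun r => r.length) ≠ [] := by
    simp only [ne_eq, List.map_eq_nil_iff]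
    exact List.ne_nil_of_length_pos (by omega)
  obtain ⟨t, ht⟩ : ∃ t, PySem.List.max? (ml.map (fun r => r.length)) (fun x => x) = some t := by
    cases hcase : PySem.List.max? (ml.map (fun r => r.length)) (fun x => x) with
    | none => exact absurd ((PySem.List.max?_eq_none_iff _ _).1 hcase) hne
    | some t => exact ⟨t, rfl⟩
  have hmax := PySem.List.max?_isMax ht
  have : ml[a].length ∈ ml.map (fun r => r.length) :=
    List.mem_map.2 ⟨ml[a], List.getElem_mem ha, rfl⟩
  have hle := hmax _ this
  rw [PySem.List.maxD, ht]
  exact hle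

-- the two per-pair consequences of Pre_ and ¬ D_ on the char-list rows
theorem pre_getElem (map_list : List String) (h : Pre_diff_by_one map_list) :
    ∀ (a b : Nat) (ha : a < (map_list.map String.toList).length)
      (hb : b < (map_list.map String.toList).length), a < b →
      ((map_list.map String.toList)[b]).length < ((map_list.map String.toList)[a]).length →
      2 ≤ (((map_list.map String.toList)[a].zip ((map_list.map String.toList)[b])).countP
            (fun c => !(c.1 == c.2))) := by
  intro a b ha hb hab hlt
  have hh := (List.pairwise_iff_getElem.1 h) a b (by simpa using ha) (by simpa using hb) hab
  simp only [List.getElem_map] at *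
  exact hh hlt

theorem nd_getElem (map_list : List String) (h : ¬ D_diff_by_one map_list) :
    ∀ (a b : Nat) (ha : a < (map_list.map String.toList).length)
      (hb : b < (map_list.map String.toList).length), a < b →
      ((map_list.map String.toList)[a]).length < ((map_list.map String.toList)[b]).length →
      (((map_list.map String.toList)[a].zip ((map_list.map String.toList)[b])).countP
            (fun c => !(c.1 == c.2))) ≠ 1 := by
  intro a b ha hb hab hlt hcnt
  unfold D_diff_by_one at h
  rw [not_not] at h
  have hh := (List.pairwise_iff_getElem.1 h) a b (by simpa using ha) (by simpa using hb) hab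
  simp only [List.getElem_map] at *
  exact hh ⟨hlt, hcnt⟩

-- ===== VERDICT (by name: the statement is the Claim_ definition above) =====
theorem diff_by_one_spec : Claim_unchanged_diff_by_one := by
  unfold Claim_unchanged_diff_by_one
  intro map_list _hdom hpre
  unfold Spec_diff_by_one
  intro hnd
  rw [diff_by_one_eq_canon map_list hpre, diff_by_one_alt_eq]
  set ml := map_list.map String.toList with hml
  set m := PySem.List.maxD (ml.map (fun r => r.length)) (fun x => x) 0 with hmdef
  have hPre := pre_getElem map_list hpre
  have hND := nd_getElem map_list hnd
  rw [← hml] at hPre hND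
  have hiff : ∀ x, x ∈ canon ml ↔ x ∈ bPairs ml m := by
    intro x
    rw [mem_canon, mem_bPairs]
    constructor
    · rintro ⟨a, b, ha, hb, hab, rfl, hd⟩
      have hcnt : ((ml[a].zip ml[b]).countP (fun c => !(c.1 == c.2))) = 1 := by
        simpa [dOne] using hd
      have hlen : ml[a].length = ml[b].length := by
        rcases Nat.lt_trichotomy ml[a].length ml[b].length with h | h | h
        · exact absurd hcnt (hND a b ha hb hab h)
        · exact h
        · exact absurd (hPre a b ha hb hab h) (by omega)
      obtain ⟨p, hp⟩ := (dOne_iff ml[a] ml[b] hlen).1 hd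
      have hplt : p < ml[a].length := Eone_lt_length hlen hp
      have hmask := (maskAt_eq_iff ml[a] ml[b] hlen p).2 hp
      exact ⟨p, by have := row_len_le_m ml a ha; omega,
        (mem_blockP ml p _).2 ⟨a, b, ha, hb, hab, rfl, hlen, hmask.1, hmask.2⟩⟩
    · rintro ⟨p, hp, hx⟩
      rcases (mem_blockP ml p x).1 hx with ⟨a, b, ha, hb, hab, rfl, hlen, hmk, hne⟩
      have hE := (maskAt_eq_iff ml[a] ml[b] hlen p).1 ⟨hmk, hne⟩
      exact ⟨a, b, ha, hb, hab, rfl, (dOne_iff ml[a] ml[b] hlen).2 ⟨p, hE⟩⟩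
  have hperm : (canon ml).Perm (bPairs ml m) :=
    (List.perm_ext_iff_of_nodup (nodup_of_pairwise_blt (canon_pairwise ml))
      (nodup_bPairs ml m)).2 hiff
  exact (sorted2_eq_of_perm_pairwise (canon_pairwise ml) hperm).symm

theorem diff_by_one_changed : Claim_changed_diff_by_one := by
  unfold Claim_changed_diff_by_one; decide

theorem diff_by_one_tight : Claim_exact_diff_by_one := by
  unfold Claim_exact_diff_by_one
  intro map_list _hdom hpre hd heq
  unfold D_diff_by_one at hd
  rw [List.pairwise_iff_getElem] at hd
  push Not at hd
  obtain ⟨a, b, ha, hb, hab, hcond⟩ := hd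
  set ml := map_list.map String.toList with hml
  have ha' : a < ml.length := by rw [hml, List.length_map]; exact ha
  have hb' : b < ml.length := by rw [hml, List.length_map]; exact hb
  have hlt : ml[a].length < ml[b].length := by
    have := hcond.1; simpa [hml] using this
  have hcnt : ((ml[a].zip ml[b]).countP (fun c => !(c.1 == c.2))) = 1 := by
    have := hcond.2; simpa [hml, prefDiffs] using this
  have hmem : ((a : Int), (b : Int)) ∈ diff_by_one map_list := by
    rw [diff_by_one_eq_canon map_list hpre]
    exact (mem_canon ml _).2 ⟨a, b, ha', hb', hab, rfl, by simpa [dOne] using hcnt⟩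
  have hnotmem : ((a : Int), (b : Int)) ∉ diff_by_one_alt map_list := by
    rw [diff_by_one_alt_eq]
    intro hmem2
    have hbp : ((a : Int), (b : Int)) ∈ bPairs ml
        (PySem.List.maxD (ml.map (fun r => r.length)) (fun x => x) 0) :=
      (PySem.List.sorted2_perm _ _ _ _).mem_iff.1 hmem2
    rcases (mem_bPairs ml _ _).1 hbp with ⟨p, _, hxb⟩
    rcases (mem_blockP ml p _).1 hxb with ⟨a2, b2, ha2, hb2, _, hx', hlen', _, _⟩
    have haa : a = a2 := by
      have h := congrArg Prod.fst hx'; simp at h; exact_mod_cast h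
    have hbb : b = b2 := by
      have h := congrArg Prod.snd hx'; simp at h; exact_mod_cast h
    subst haa; subst hbb
    omega
  rw [heq] at hmem
  exact hnotmem hmem
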